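-- pv_equiv track=rewrite | github.com/christianodenwald/causality_checker | src/theories/gallow.py | _generate_networks
-- ===== SOURCE A (Python) =====
-- import itertools
-- from typing import Any, Callable, Dict, List, Optional, Set, Tuple
--
-- Edge = Tuple[str, str]
--
-- def _generate_networks(networks_from_cause: Dict[str, List[Set[Edge]]]) -> List[Set[Edge]]:
--     """Combine one network per cause into full networks."""
--     per_cause_options: List[List[Set[Edge]]] = [nets for nets in networks_from_cause.values()]
--     if not per_cause_options:
--         return []
--
--     combined_networks: List[Set[Edge]] = []
--     seen: Set[frozenset[Edge]] = set()
--     for selection in itertools.product(*per_cause_options):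
--         edges_union: Set[Edge] = set()
--         for net in selection:
--             edges_union.update(net)
--
--         key = frozenset(edges_union)
--         if key in seen:
--             continue
--         seen.add(key)
--         combined_networks.append(edges_union)
--     return combined_networks
-- ===== SOURCE B (Python) =====
-- def _generate_networks(networks_from_cause):
--     """Combine one network per cause into full networks.
--
--     Different algorithm: instead of enumerating every full Cartesian-product
--     tuple and deduplicating the unions afterwards, maintain a DEDUPLICATED
--     list of partial unions and extend it one cause at a time.  Dropping a
--     duplicate partial union early prunes its entire subtree of combinations
--     (they could only reproduce unions already generated earlier), which can
--     shrink the work exponentially while preserving A's first-occurrence order.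
--     """
--     per_cause = list(networks_from_cause.values())
--     if not per_cause:
--         return []
--
--     def first_occurrences(nets):
--         out, seen = [], set()
--         for net in nets:
--             key = frozenset(net)
--             if key not in seen:
--                 seen.add(key)
--                 out.append(net)
--         return out
--
--     running = first_occurrences([set(option) for option in per_cause[0]])
--     for options in per_cause[1:]:
--         running = first_occurrences(
--             [partial | option for partial in running for option in options])
--     return running
-- ===== Notes on version B (the rewrite author's own statement) =====
-- stated objective: alternative
-- what changed: A enumerates every full itertools.product tuple, unions each from scratch and dedups afterwards; B never materialises product tuples: it folds cause by cause over a list of partial unions that is DEDUPLICATED at every stage, so a duplicate partial union prunes its whole subtree of combinations (correct because equal partial unions generate equal final unions, blockwise earlier in product order).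
import Mathlib
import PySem

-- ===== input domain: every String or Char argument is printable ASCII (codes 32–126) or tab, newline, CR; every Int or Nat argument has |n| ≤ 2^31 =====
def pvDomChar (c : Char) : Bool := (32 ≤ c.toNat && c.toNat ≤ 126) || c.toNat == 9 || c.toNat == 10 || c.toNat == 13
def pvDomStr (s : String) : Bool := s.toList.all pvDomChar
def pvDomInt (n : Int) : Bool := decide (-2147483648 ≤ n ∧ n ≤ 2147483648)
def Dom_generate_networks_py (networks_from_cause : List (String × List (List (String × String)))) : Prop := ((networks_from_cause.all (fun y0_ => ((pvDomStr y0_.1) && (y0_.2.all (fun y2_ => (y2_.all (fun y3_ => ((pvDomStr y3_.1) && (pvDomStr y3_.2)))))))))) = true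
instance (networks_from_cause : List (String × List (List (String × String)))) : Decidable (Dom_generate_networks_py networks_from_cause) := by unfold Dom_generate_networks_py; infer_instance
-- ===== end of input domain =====

-- B replaces A's enumerate-all-product-tuples-then-dedup strategy by a stage-wise algorithm that
-- keeps only DEDUPLICATED partial unions after each cause (pruning whole subtrees of combinations);
-- equivalence of the RETURN value is proved (neither version mutates its argument).

-- ===== PORT A =====
-- itertools.product(*lists): tuples in lexicographic order, leftmost varies slowest
def pyProduct {α : Type} : List (List α) → List (List α)
  | [] => [[]]
  | os :: rest => os.flatMap (fun o => (pyProduct rest).map (fun t => o :: t))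

def generate_networks_py (networks_from_cause : List (String × List (List (String × String)))) : List (List (String × String)) :=
  let per_cause_options := (PySem.Dict.ofList networks_from_cause).values
  if per_cause_options.isEmpty then []
  else
    ((pyProduct per_cause_options).foldl
      (fun (st : List (List (String × String)) × List (List (String × String))) selection =>
        let edges_union := selection.foldl (fun acc net => PySem.Set.update acc net) PySem.Set.empty
        -- 'key = frozenset(edges_union); key in seen' is set-equality membership
        if st.2.any (fun k => PySem.Set.equal k edges_union) then st
        else (st.1 ++ [edges_union], st.2 ++ [edges_union]))
      ([], [])).1

-- ===== PORT B =====
-- Source B's helper: keep the first occurrence of every distinct set ('key not in seen' is set equality)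
def first_occurrences_port (nets : List (List (String × String))) : List (List (String × String)) :=
  (nets.foldl
    (fun (st : List (List (String × String)) × List (List (String × String))) net =>
      if st.2.any (fun k => PySem.Set.equal k net) then st
      else (st.1 ++ [net], st.2 ++ [net]))
    ([], [])).1

def generate_networks_py_alt (networks_from_cause : List (String × List (List (String × String)))) : List (List (String × String)) :=
  match (PySem.Dict.ofList networks_from_cause).values with
  | [] => []
  | first :: rest =>
    rest.foldl
      (fun running options =>
        first_occurrences_port
          (running.flatMap (fun part => options.map (fun option => PySem.Set.union part option))))
      (first_occurrences_port (first.map (fun option => PySem.Set.ofList option)))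

-- ===== PRECONDITION & SPEC =====
def Spec_generate_networks_py (networks_from_cause : List (String × List (List (String × String)))) (out : List (List (String × String))) : Prop := out = generate_networks_py_alt networks_from_cause
instance (networks_from_cause : List (String × List (List (String × String)))) (out : List (List (String × String))) : Decidable (Spec_generate_networks_py networks_from_cause out) := by unfold Spec_generate_networks_py; infer_instance

-- ===== CLAIM (what is proved, stated in full; the proofs are below) =====
def Claim_equal_generate_networks_py : Prop := ∀ (networks_from_cause : List (String × List (List (String × String)))), Dom_generate_networks_py networks_from_cause → Spec_generate_networks_py networks_from_cause (generate_networks_py networks_from_cause)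

-- ===== LEMMAS AND PROOFS =====

-- the dedup key: a net's underlying finite set (Python's frozenset)
def netKey (l : List (String × String)) : Finset (String × String) := l.toFinset

theorem equal_key_iff (a b : List (String × String)) :
    PySem.Set.equal a b = true ↔ netKey a = netKey b := by
  rw [PySem.Set.equal_iff]
  constructor
  · intro h; ext x; simpa [netKey, List.mem_toFinset] using h x
  · intro h x
    have := Finset.ext_iff.mp h x
    simpa [netKey, List.mem_toFinset] using this

theorem key_union (p o : List (String × String)) :
    netKey (PySem.Set.union p o) = netKey p ∪ netKey o := by
  ext x
  simp [netKey, List.mem_toFinset, PySem.Set.mem_union]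

-- first-occurrence dedup with an explicit list of already-seen keys
def dA {α κ : Type} [DecidableEq κ] (K : α → κ) : List κ → List α → List α
  | _, [] => []
  | s, x :: t => if K x ∈ s then dA K s t else x :: dA K (K x :: s) t

theorem dA_congr_seen {α κ : Type} [DecidableEq κ] (K : α → κ) :
    ∀ (xs : List α) (s s' : List κ), (∀ c, c ∈ s ↔ c ∈ s') → dA K s xs = dA K s' xs := by
  intro xs
  induction xs with
  | nil => intro s s' _; rfl
  | cons x t ih =>
    intro s s' h
    by_cases hx : K x ∈ s
    · rw [dA, dA, if_pos hx, if_pos ((h (K x)).mp hx)]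
      exact ih s s' h
    · rw [dA, dA, if_neg hx, if_neg (fun hc => hx ((h (K x)).mpr hc))]
      exact congrArg (x :: ·) (ih _ _ (fun c => by simp [List.mem_cons, h c]))

theorem dA_append {α κ : Type} [DecidableEq κ] (K : α → κ) :
    ∀ (a b : List α) (s : List κ),
      dA K s (a ++ b) = dA K s a ++ dA K (s ++ a.map K) b := by
  intro a
  induction a with
  | nil => intro b s; simp [dA]
  | cons x a' ih =>
    intro b s
    by_cases hx : K x ∈ s
    · rw [List.cons_append, dA, if_pos hx, dA, if_pos hx, ih]
      exact congrArg _ (dA_congr_seen K b _ _ (fun c => by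
        simp only [List.map_cons, List.mem_append, List.mem_cons]
        have hcx : c = K x → c ∈ s := fun h => h ▸ hx
        tauto))
    · rw [List.cons_append, dA, if_neg hx, dA, if_neg hx, ih, List.cons_append]
      refine congrArg (x :: ·) (congrArg _ (dA_congr_seen K b _ _ (fun c => by
        simp only [List.map_cons, List.mem_append, List.mem_cons]
        tauto)))

theorem dA_append_of_keys_mem {α κ : Type} [DecidableEq κ] (K : α → κ) :
    ∀ (b c : List α) (s : List κ), (∀ y ∈ b, K y ∈ s) → dA K s (b ++ c) = dA K s c := by
  intro b
  induction b with
  | nil => intro c s _; rfl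
  | cons y b' ih =>
    intro c s h
    rw [List.cons_append, dA, if_pos (h y (List.mem_cons_self))]
    exact ih c s (fun z hz => h z (List.mem_cons_of_mem y hz))

-- dropping (from the inner list) elements whose key is a duplicate of x's does not change
-- the outer dedup, provided every key of f x is already seen
theorem dA_filter_drop {α κ : Type} [DecidableEq κ] (K : α → κ) (f : α → List α)
    (Hf : ∀ x y, K x = K y → (f x).map K = (f y).map K) (x : α) (p : List κ) :
    ∀ (t : List α) (s : List κ), (∀ c ∈ (f x).map K, c ∈ s) →
      dA K s ((t.filter (fun y => decide (K y ∉ p))).flatMap f)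
        = dA K s ((t.filter (fun y => decide (K y ∉ (K x :: p)))).flatMap f) := by
  intro t
  induction t with
  | nil => intro s _; rfl
  | cons z t' ih =>
    intro s hs
    by_cases hzp : K z ∈ p
    · rw [List.filter_cons_of_neg (by simpa using hzp),
        List.filter_cons_of_neg (by simp [hzp])]
      exact ih s hs
    · by_cases hzx : K z = K x
      · rw [List.filter_cons_of_pos (by simpa using hzp),
          List.filter_cons_of_neg (by simp [hzx]),
          List.flatMap_cons,
          dA_append_of_keys_mem K (f z) _ s (fun y hy => hs (K y) (by
            rw [← Hf z x hzx]; exact List.mem_map_of_mem hy))]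
        exact ih s hs
      · rw [List.filter_cons_of_pos (by simpa using hzp),
          List.filter_cons_of_pos (by simp [hzx, hzp]),
          List.flatMap_cons, List.flatMap_cons, dA_append, dA_append]
        exact congrArg _ (ih _ (fun c hc => List.mem_append_left _ (hs c hc)))

-- the crux: deduplicating the partials BEFORE extending them does not change the deduped result
theorem dA_flatMap_dedup {α κ : Type} [DecidableEq κ] (K : α → κ) (f : α → List α)
    (Hf : ∀ x y, K x = K y → (f x).map K = (f y).map K) :
    ∀ (xs : List α) (s p : List κ),
      dA K s ((dA K p xs).flatMap f)
        = dA K s ((xs.filter (fun y => decide (K y ∉ p))).flatMap f) := by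
  intro xs
  induction xs with
  | nil => intro s p; rfl
  | cons x t ih =>
    intro s p
    by_cases hx : K x ∈ p
    · rw [dA, if_pos hx, List.filter_cons_of_neg (by simpa using hx)]
      exact ih s p
    · rw [dA, if_neg hx, List.filter_cons_of_pos (by simpa using hx),
        List.flatMap_cons, List.flatMap_cons, dA_append, dA_append,
        ih (s ++ (f x).map K) (K x :: p)]
      exact congrArg _ (dA_filter_drop K f Hf x p t _
        (fun c hc => List.mem_append_right _ hc)).symm

theorem dA_flatMap_dedup_nil {α κ : Type} [DecidableEq κ] (K : α → κ) (f : α → List α)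
    (Hf : ∀ x y, K x = K y → (f x).map K = (f y).map K) (xs : List α) :
    dA K [] ((dA K [] xs).flatMap f) = dA K [] (xs.flatMap f) := by
  rw [dA_flatMap_dedup K f Hf xs [] []]
  simp

-- the (out, seen) fold of both ports, on a list produced by g, is dA over the mapped list
theorem foldl_dedupStep_map {β : Type} (g : β → List (String × String)) (xs : List β) :
    ∀ (o : List (List (String × String))),
      xs.foldl
        (fun (st : List (List (String × String)) × List (List (String × String))) b =>
          let u := g b
          if st.2.any (fun k => PySem.Set.equal k u) then st
          else (st.1 ++ [u], st.2 ++ [u]))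
        (o, o)
      = (o ++ dA netKey (o.map netKey) (xs.map g), o ++ dA netKey (o.map netKey) (xs.map g)) := by
  induction xs with
  | nil => intro o; simp [dA]
  | cons b bs ih =>
    intro o
    by_cases hm : netKey (g b) ∈ o.map netKey
    · have hany : o.any (fun k => PySem.Set.equal k (g b)) = true := by
        rw [List.any_eq_true]
        rcases List.mem_map.mp hm with ⟨k, hk, hke⟩
        exact ⟨k, hk, (equal_key_iff k (g b)).mpr hke⟩
      rw [List.foldl_cons]
      simp only [hany, if_true]
      rw [ih o, List.map_cons, dA, if_pos hm]
    · have hany : o.any (fun k => PySem.Set.equal k (g b)) = false := by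
        rw [List.any_eq_false]
        intro k hk hke
        exact hm (List.mem_map.mpr ⟨k, hk, (equal_key_iff k (g b)).mp hke⟩)
      rw [List.foldl_cons]
      simp only [hany, Bool.false_eq_true, if_false]
      rw [ih (o ++ [g b]), List.map_cons, dA, if_neg hm]
      have hseen : dA netKey ((o ++ [g b]).map netKey) (bs.map g)
          = dA netKey (netKey (g b) :: o.map netKey) (bs.map g) := by
        refine dA_congr_seen netKey _ _ _ (fun c => by
          simp only [List.map_append, List.map_cons, List.map_nil, List.mem_append,
            List.mem_cons]
          tauto)
      rw [hseen]
      simp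

theorem first_occurrences_eq_dA (nets : List (List (String × String))) :
    first_occurrences_port nets = dA netKey [] nets := by
  unfold first_occurrences_port
  have := foldl_dedupStep_map (fun n => n) nets []
  simp only [List.map_nil] at this
  rw [this]
  simp

-- B's stage-wise fold computes the dedup of all product unions
theorem b_fold_eq (rest : List (List (List (String × String)))) :
    ∀ (init : List (List (String × String))),
      rest.foldl
        (fun running options =>
          first_occurrences_port
            (running.flatMap (fun part => options.map (fun option => PySem.Set.union part option))))
        (first_occurrences_port init)
      = dA netKey []
          (init.flatMap (fun p => (pyProduct rest).map
            (fun sel => sel.foldl (fun acc net => PySem.Set.update acc net) p))) := by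
  induction rest with
  | nil =>
    intro init
    rw [List.foldl_nil, first_occurrences_eq_dA]
    simp [pyProduct]
  | cons options rest ih =>
    intro init
    have Hf : ∀ x y, netKey x = netKey y →
        ((options.map (fun o => PySem.Set.union x o)).map netKey)
          = ((options.map (fun o => PySem.Set.union y o)).map netKey) := by
      intro x y hxy
      simp only [List.map_map]
      exact List.map_congr_left (fun o _ => by
        simp only [Function.comp_apply, key_union, hxy])
    rw [List.foldl_cons, first_occurrences_eq_dA, first_occurrences_eq_dA,
      dA_flatMap_dedup_nil netKey _ Hf, ← first_occurrences_eq_dA, ih]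
    congr 1
    rw [List.flatMap_assoc]
    refine List.flatMap_congr (fun p _ => ?_)
    simp only [pyProduct, List.map_flatMap, List.flatMap_map, List.map_map]
    rfl

-- ===== VERDICT (by name: the statement is the Claim_ definition above) =====
theorem generate_networks_py_spec : Claim_equal_generate_networks_py := by
  intro nfc _
  unfold Spec_generate_networks_py generate_networks_py generate_networks_py_alt
  cases h : (PySem.Dict.ofList nfc).values with
  | nil => simp
  | cons first rest =>
    simp only [List.isEmpty_cons, Bool.false_eq_true, if_false]
    have hA := foldl_dedupStep_map
      (fun sel => sel.foldl (fun acc net => PySem.Set.update acc net) PySem.Set.empty)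
      (pyProduct (first :: rest)) []
    simp only [List.map_nil] at hA
    rw [hA]
    simp only [List.nil_append]
    rw [b_fold_eq rest (first.map (fun option => PySem.Set.ofList option))]
    congr 1
    simp only [pyProduct, List.map_flatMap, List.flatMap_map, List.map_map]
    rfl
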